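-- pv_equiv track=rewrite | github.com/pypi-data/pypi-mirror-347 | packages/lecatchu/lecatchu-6.0.0.tar.gz/lecatchu-6.0.0/lecatchu_v5.py | combine2
-- ===== SOURCE A (Python) =====
-- def combine2(target, count):
-- 	target = list(target)
-- 	new = []
-- 	for h in target:
-- 		if len(new) >= count:
-- 			break
-- 		for h2 in target:
-- 			if len(new) >= count:
-- 				break
-- 			for h3 in target:
-- 				if len(new) >= count:
-- 					break
-- 				for h4 in target:
-- 					if len(new) >= count:
-- 						break
-- 					new.append(h+h2+h3+h4)
-- 	return new[:count]
-- ===== SOURCE B (Python) =====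
-- def combine2(target, count):
--     target = list(target)
--     n = len(target)
--     total = max(0, min(count, n ** 4))
--     return [target[i // n ** 3 % n] + target[i // n ** 2 % n]
--             + target[i // n % n] + target[i % n]
--             for i in range(total)]
-- ===== Notes on version B (the rewrite author's own statement) =====
-- stated objective: alternative
-- what changed: Replaced the four nested loops with break logic by a single pass over range(max(0, min(count, n**4))) that computes each element's four factors by base-n digit arithmetic (i // n**k % n) and indexes the list directly.
import Mathlib
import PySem

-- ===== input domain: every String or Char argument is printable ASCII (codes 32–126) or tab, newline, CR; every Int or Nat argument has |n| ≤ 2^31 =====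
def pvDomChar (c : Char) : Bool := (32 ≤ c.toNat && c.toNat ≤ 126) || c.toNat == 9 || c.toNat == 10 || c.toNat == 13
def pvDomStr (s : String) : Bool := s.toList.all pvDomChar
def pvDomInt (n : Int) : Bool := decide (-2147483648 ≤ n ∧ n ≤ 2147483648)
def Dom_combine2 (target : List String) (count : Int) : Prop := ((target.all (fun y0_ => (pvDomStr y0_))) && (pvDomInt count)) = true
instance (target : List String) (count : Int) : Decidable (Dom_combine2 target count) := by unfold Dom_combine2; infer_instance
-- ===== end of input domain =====

-- B replaces A's four nested loops with break logic by one index-driven pass that computes each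
-- element's four factors by base-n digit arithmetic; same asymptotic cost ('alternative').

-- ===== PORT A =====
-- All four of A's loops have the same shape: iterate over the items, break when
-- len(new) >= count, otherwise run the body on the accumulator. c2bloop is that
-- shape (break = return the accumulator unchanged).
def c2bloop (count : Int) (body : String → List String → List String) :
    List String → List String → List String
  | new, [] => new
  | new, x :: t =>
      if count ≤ (new.length : Int) then new
      else c2bloop count body (body x new) t

def combine2 (target : List String) (count : Int) : List String :=
  let l4 := fun (pre : String) (new : List String) =>
    c2bloop count (fun h4 acc => acc ++ [pre ++ h4]) new target
  let l3 := fun (pre : String) (new : List String) =>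
    c2bloop count (fun h3 acc => l4 (pre ++ h3) acc) new target
  let l2 := fun (pre : String) (new : List String) =>
    c2bloop count (fun h2 acc => l3 (pre ++ h2) acc) new target
  let new := c2bloop count (fun h acc => l2 h acc) [] target
  PySem.List.slice new none (some count)

-- ===== PORT B =====
def combine2_alt (target : List String) (count : Int) : List String :=
  let n : Int := (target.length : Int)
  let total : Int := max 0 (min count (n ^ 4))
  (PySem.List.pyRange 0 total 1).map (fun i =>
    PySem.List.pyGetD target (PySem.Int.mod (PySem.Int.floordiv i (n ^ 3)) n) ""
      ++ PySem.List.pyGetD target (PySem.Int.mod (PySem.Int.floordiv i (n ^ 2)) n) ""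
      ++ PySem.List.pyGetD target (PySem.Int.mod (PySem.Int.floordiv i n) n) ""
      ++ PySem.List.pyGetD target (PySem.Int.mod i n) "")

-- ===== PRECONDITION & SPEC =====
def Spec_combine2 (target : List String) (count : Int) (out : List String) : Prop := out = combine2_alt target count
instance (target : List String) (count : Int) (out : List String) : Decidable (Spec_combine2 target count out) := by unfold Spec_combine2; infer_instance

-- ===== CLAIM (what is proved, stated in full; the proofs are below) =====
def Claim_equal_combine2 : Prop := ∀ (target : List String) (count : Int), Dom_combine2 target count → Spec_combine2 target count (combine2 target count)

-- ===== LEMMAS AND PROOFS =====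

-- The full 4-fold product, in A's iteration order and with A's grouping of the concatenations.
def c2K1 (target : List String) (pre : String) : List String :=
  target.flatMap (fun d => [pre ++ d])
def c2K2 (target : List String) (pre : String) : List String :=
  target.flatMap (fun c => c2K1 target (pre ++ c))
def c2K3 (target : List String) (pre : String) : List String :=
  target.flatMap (fun b => c2K2 target (pre ++ b))
def c2P (target : List String) : List String :=
  target.flatMap (fun a => c2K3 target a)

-- A break-at-count loop whose body appends the prefix of (F x) that still fits
-- produces the fitting prefix of (t.flatMap F).
theorem c2bloop_spec (count : Int) (body : String → List String → List String)
    (F : String → List String)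
    (hbody : ∀ x new, (new.length : Int) < count →
      body x new = new ++ (F x).take (count - new.length).toNat) :
    ∀ (t : List String) (new : List String),
      c2bloop count body new t = new ++ (t.flatMap F).take (count - new.length).toNat := by
  intro t
  induction t with
  | nil => intro new; simp [c2bloop]
  | cons x t ih =>
    intro new
    rw [c2bloop]
    by_cases hc : count ≤ (new.length : Int)
    · rw [if_pos hc]
      have h0 : (count - (new.length : Int)).toNat = 0 := by omega
      simp [h0]
    · rw [if_neg hc, hbody x new (by omega), ih]
      rw [List.flatMap_cons, List.take_append, List.append_assoc]
      congr 2
      simp only [List.length_append, List.length_take]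
      congr 1
      omega

theorem flatMap_length_const {α β : Type} (F : α → List β) (m : Nat)
    (hm : ∀ x, (F x).length = m) (xs : List α) :
    (xs.flatMap F).length = xs.length * m := by
  induction xs with
  | nil => simp
  | cons x t ih => simp [hm, ih]; ring

theorem flatMap_getElem?_const {α β : Type} (F : α → List β) (m : Nat)
    (hm : ∀ x, (F x).length = m) (xs : List α) (i : Nat) (h : i < xs.length * m) :
    (xs.flatMap F)[i]? = (F (xs[i / m]'(by
      have hm0 : 0 < m := by
        rcases Nat.eq_zero_or_pos m with h0 | h0
        · subst h0; omega
        · exact h0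
      exact (Nat.div_lt_iff_lt_mul hm0).mpr h)))[i % m]? := by
  induction xs generalizing i with
  | nil => simp at h
  | cons x t ih =>
    have hm0 : 0 < m := by
      rcases Nat.eq_zero_or_pos m with h0 | h0
      · subst h0; simp at h
      · exact h0
    rw [List.flatMap_cons]
    by_cases hi : i < m
    · rw [List.getElem?_append_left (by rw [hm]; exact hi)]
      have h1 : i / m = 0 := Nat.div_eq_of_lt hi
      have h2 : i % m = i := Nat.mod_eq_of_lt hi
      simp [h1, h2]
    · obtain ⟨j, rfl⟩ : ∃ j, i = m + j := ⟨i - m, by omega⟩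
      rw [List.getElem?_append_right (by rw [hm]; omega)]
      have hj : j < t.length * m := by
        simp [List.length_cons, Nat.succ_mul] at h; omega
      have hd : (m + j) / m = j / m + 1 := by
        rw [Nat.add_comm, Nat.add_div_right _ hm0]
      have hmd : (m + j) % m = j % m := Nat.add_mod_left m j
      rw [hm]
      have hsub : m + j - m = j := by omega
      rw [hsub, ih j hj]
      congr 1
      · congr 1
        simp only [hd, List.getElem_cons_succ]
      · rw [hmd]

theorem c2K1_length (target : List String) (pre : String) :
    (c2K1 target pre).length = target.length := by
  rw [c2K1, flatMap_length_const (fun d => [pre ++ d]) 1 (fun _ => rfl) target]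
  omega

theorem c2K2_length (target : List String) (pre : String) :
    (c2K2 target pre).length = target.length ^ 2 := by
  have h := flatMap_length_const (fun c => c2K1 target (pre ++ c)) target.length
    (fun c => c2K1_length target (pre ++ c)) target
  rw [c2K2, h]; ring

theorem c2K3_length (target : List String) (pre : String) :
    (c2K3 target pre).length = target.length ^ 3 := by
  have h := flatMap_length_const (fun b => c2K2 target (pre ++ b)) (target.length ^ 2)
    (fun b => c2K2_length target (pre ++ b)) target
  rw [c2K3, h]; ring

theorem c2P_length (target : List String) :
    (c2P target).length = target.length ^ 4 := by
  have h := flatMap_length_const (fun a => c2K3 target a) (target.length ^ 3)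
    (fun a => c2K3_length target a) target
  rw [c2P, h]; ring

theorem c2K1_getElem? (target : List String) (pre : String) (l : Nat)
    (h : l < target.length) :
    (c2K1 target pre)[l]? = some (pre ++ target.getD l "") := by
  rw [c2K1, flatMap_getElem?_const (fun d => [pre ++ d]) 1 (fun _ => rfl) target l (by omega)]
  have h1 : l / 1 = l := Nat.div_one l
  have h2 : l % 1 = 0 := Nat.mod_one l
  simp [h1, h2, List.getD_eq_getElem?_getD, List.getElem?_eq_getElem h]

theorem c2K2_getElem? (target : List String) (pre : String) (j : Nat)
    (h : j < target.length ^ 2) :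
    (c2K2 target pre)[j]? = some ((pre ++ target.getD (j / target.length) "")
      ++ target.getD (j % target.length) "") := by
  have hn : 0 < target.length := by
    rcases Nat.eq_zero_or_pos target.length with h0 | h0
    · rw [h0] at h; simp at h
    · exact h0
  have hdiv : j / target.length < target.length :=
    (Nat.div_lt_iff_lt_mul hn).mpr (by rw [← sq]; exact h)
  rw [c2K2, flatMap_getElem?_const (fun c => c2K1 target (pre ++ c)) target.length
    (fun c => c2K1_length target (pre ++ c)) target j (by rw [← sq]; exact h)]
  rw [c2K1_getElem? target _ _ (Nat.mod_lt _ hn)]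
  rw [List.getD_eq_getElem target "" hdiv]

theorem c2K3_getElem? (target : List String) (pre : String) (j : Nat)
    (h : j < target.length ^ 3) :
    (c2K3 target pre)[j]? = some (((pre ++ target.getD (j / target.length ^ 2) "")
      ++ target.getD (j / target.length % target.length) "")
      ++ target.getD (j % target.length) "") := by
  have hn : 0 < target.length := by
    rcases Nat.eq_zero_or_pos target.length with h0 | h0
    · rw [h0] at h; simp at h
    · exact h0
  have h3 : target.length * target.length ^ 2 = target.length ^ 3 := by ring
  have hdiv : j / target.length ^ 2 < target.length :=
    (Nat.div_lt_iff_lt_mul (Nat.pow_pos hn)).mpr (by rw [h3]; exact h)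
  rw [c2K3, flatMap_getElem?_const (fun b => c2K2 target (pre ++ b)) (target.length ^ 2)
    (fun b => c2K2_length target (pre ++ b)) target j (by rw [h3]; exact h)]
  rw [c2K2_getElem? target _ _ (Nat.mod_lt _ (Nat.pow_pos hn))]
  have e1 : j % target.length ^ 2 / target.length = j / target.length % target.length := by
    have hsq : target.length ^ 2 = target.length * target.length := by ring
    rw [hsq, Nat.mod_mul_right_div_self]
  have e2 : j % target.length ^ 2 % target.length = j % target.length :=
    Nat.mod_mod_of_dvd j ⟨target.length, by ring⟩
  rw [e1, e2, List.getD_eq_getElem target "" hdiv]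

theorem c2P_getElem? (target : List String) (i : Nat)
    (h : i < target.length ^ 4) :
    (c2P target)[i]? = some ((((target.getD (i / target.length ^ 3 % target.length) ""
      ++ target.getD (i / target.length ^ 2 % target.length) "")
      ++ target.getD (i / target.length % target.length) "")
      ++ target.getD (i % target.length) "")) := by
  have hn : 0 < target.length := by
    rcases Nat.eq_zero_or_pos target.length with h0 | h0
    · rw [h0] at h; simp at h
    · exact h0
  have h4 : target.length * target.length ^ 3 = target.length ^ 4 := by ring
  have hdiv : i / target.length ^ 3 < target.length :=
    (Nat.div_lt_iff_lt_mul (Nat.pow_pos hn)).mpr (by rw [h4]; exact h)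
  rw [c2P, flatMap_getElem?_const (fun a => c2K3 target a) (target.length ^ 3)
    (fun a => c2K3_length target a) target i (by rw [h4]; exact h)]
  rw [c2K3_getElem? target _ _ (Nat.mod_lt _ (Nat.pow_pos hn))]
  have e1 : i % target.length ^ 3 / target.length ^ 2
      = i / target.length ^ 2 % target.length := by
    have h32 : target.length ^ 3 = target.length ^ 2 * target.length := by ring
    rw [h32, Nat.mod_mul_right_div_self]
  have e2 : i % target.length ^ 3 / target.length % target.length
      = i / target.length % target.length := by
    have h32 : i % target.length ^ 3 % target.length ^ 2 = i % target.length ^ 2 :=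
      Nat.mod_mod_of_dvd i ⟨target.length, by ring⟩
    have hsq : target.length ^ 2 = target.length * target.length := by ring
    calc i % target.length ^ 3 / target.length % target.length
        = i % target.length ^ 3 % (target.length * target.length) / target.length :=
          (Nat.mod_mul_right_div_self _ _ _).symm
      _ = i % target.length ^ 3 % target.length ^ 2 / target.length := by rw [← hsq]
      _ = i % target.length ^ 2 / target.length := by rw [h32]
      _ = i / target.length % target.length := by rw [hsq, Nat.mod_mul_right_div_self]
  have e3 : i % target.length ^ 3 % target.length = i % target.length :=
    Nat.mod_mod_of_dvd i ⟨target.length ^ 2, by ring⟩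
  have d1 : i / target.length ^ 3 % target.length = i / target.length ^ 3 :=
    Nat.mod_eq_of_lt hdiv
  rw [e1, e2, e3, d1, List.getD_eq_getElem target "" hdiv]

-- A returns the first count.toNat elements of the full product.
theorem c2A_take (target : List String) (count : Int) :
    combine2 target count = (c2P target).take count.toNat := by
  have hl4 : ∀ (pre : String) (new : List String),
      c2bloop count (fun h4 acc => acc ++ [pre ++ h4]) new target
        = new ++ (c2K1 target pre).take (count - new.length).toNat := by
    intro pre new
    rw [c2bloop_spec count _ (fun h4 => [pre ++ h4]) ?_ target new]
    · rfl
    · intro x acc hacc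
      have hk : (count - (acc.length : Int)).toNat ≠ 0 := by omega
      rcases Nat.exists_eq_succ_of_ne_zero hk with ⟨k, hk'⟩
      rw [hk']
      simp
  have hl3 : ∀ (pre : String) (new : List String),
      c2bloop count (fun h3 acc =>
        c2bloop count (fun h4 acc' => acc' ++ [(pre ++ h3) ++ h4]) acc target) new target
        = new ++ (c2K2 target pre).take (count - new.length).toNat := by
    intro pre new
    rw [c2bloop_spec count _ (fun h3 => c2K1 target (pre ++ h3)) ?_ target new]
    · rfl
    · intro x acc _
      exact hl4 (pre ++ x) acc
  have hl2 : ∀ (pre : String) (new : List String),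
      c2bloop count (fun h2 acc =>
        c2bloop count (fun h3 acc' =>
          c2bloop count (fun h4 acc'' => acc'' ++ [((pre ++ h2) ++ h3) ++ h4]) acc' target)
          acc target) new target
        = new ++ (c2K3 target pre).take (count - new.length).toNat := by
    intro pre new
    rw [c2bloop_spec count _ (fun h2 => c2K2 target (pre ++ h2)) ?_ target new]
    · rfl
    · intro x acc _
      exact hl3 (pre ++ x) acc
  have htop : c2bloop count (fun h acc =>
      c2bloop count (fun h2 acc' =>
        c2bloop count (fun h3 acc'' =>
          c2bloop count (fun h4 acc''' => acc''' ++ [((h ++ h2) ++ h3) ++ h4]) acc'' target)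
          acc' target) acc target) [] target
      = (c2P target).take count.toNat := by
    rw [c2bloop_spec count _ (fun h => c2K3 target h) ?_ target []]
    · simp [c2P]
    · intro x acc _
      exact hl2 x acc
  show PySem.List.slice (c2bloop count _ [] target) none (some count) = _
  rw [htop]
  by_cases hc : 0 ≤ count
  · rw [PySem.List.slice_to _ hc, List.take_take, Nat.min_self]
  · have h0 : count.toNat = 0 := by omega
    rw [h0]
    obtain ⟨k, hk, rfl⟩ : ∃ k : Nat, 0 < k ∧ count = -(k : Int) :=
      ⟨(-count).toNat, by omega, by omega⟩
    rw [PySem.List.slice_to_neg_natCast _ _ hk]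
    simp

-- B also returns the first count.toNat elements of the full product.
theorem combine2_alt_eq (target : List String) (count : Int) :
    combine2_alt target count = (c2P target).take count.toNat := by
  simp only [combine2_alt]
  set n : Nat := target.length with hn
  have hcast : ((n : Int)) ^ 4 = ((n ^ 4 : Nat) : Int) := by push_cast; ring
  set total : Int := max 0 (min count ((n : Int) ^ 4)) with htot
  have ht0 : 0 ≤ total := le_max_left _ _
  have hT : total.toNat = min count.toNat (n ^ 4) := by
    rw [htot, hcast]; omega
  rw [PySem.List.pyRange_one]
  rw [List.map_map]
  apply List.ext_getElem
  · simp only [List.length_map, List.length_range, Int.sub_zero, hT,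
      List.length_take, c2P_length]
    rfl
  · intro i hi1 hi2
    simp only [List.getElem_map, List.getElem_range, Function.comp_apply, zero_add]
    have hiT : i < total.toNat := by
      simp only [List.length_map, List.length_range, Int.sub_zero] at hi1
      exact hi1
    have hin4 : i < n ^ 4 := by omega
    have hP : (c2P target)[i]'(by rw [c2P_length]; exact hin4)
        = (((target.getD (i / n ^ 3 % n) "" ++ target.getD (i / n ^ 2 % n) "")
          ++ target.getD (i / n % n) "") ++ target.getD (i % n) "") := by
      have hsome := c2P_getElem? target i hin4
      rw [List.getElem?_eq_getElem (by rw [c2P_length]; exact hin4)] at hsome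
      exact Option.some.inj hsome
    rw [List.getElem_take, hP]
    have h3 : ((n : Int)) ^ 3 = ((n ^ 3 : Nat) : Int) := by push_cast; ring
    have h2 : ((n : Int)) ^ 2 = ((n ^ 2 : Nat) : Int) := by push_cast; ring
    rw [h3, h2]
    rw [PySem.Int.floordiv_natCast, PySem.Int.mod_natCast,
        PySem.Int.floordiv_natCast, PySem.Int.mod_natCast,
        PySem.Int.floordiv_natCast, PySem.Int.mod_natCast,
        PySem.Int.mod_natCast,
        PySem.List.pyGetD_natCast, PySem.List.pyGetD_natCast,
        PySem.List.pyGetD_natCast, PySem.List.pyGetD_natCast]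

-- ===== VERDICT (by name: the statement is the Claim_ definition above) =====
theorem combine2_spec : Claim_equal_combine2 := by
  intro target count _
  unfold Spec_combine2
  rw [c2A_take, combine2_alt_eq]
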